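-- pv_equiv track=rewrite | github.com/high-skyy/test_practice | Solutions/순위_검색_2021.py | make_tuple
-- ===== SOURCE A (Python) =====
-- def make_tuple(lang, b_f, exp, food):
--     result = []
--     for i in [lang, "-"]:
--         trans = []
--         trans.append(i)
--         for j in [b_f, "-"]:
--             trans.append(j)
--             for k in [exp, "-"]:
--                 trans.append(k)
--                 for l in [food, "-"]:
--                     trans.append(l)
--                     result.append(tuple(trans))
--                     del trans[3]
--                 del trans[2]
--             del trans[1]
--         del trans[0]
--     return result
-- ===== SOURCE B (Python) =====
-- def make_tuple(lang, b_f, exp, food):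
--     fields = [lang, b_f, exp, food]
--     result = []
--     for mask in range(16):
--         result.append(tuple("-" if mask // 2 ** (3 - idx) % 2 else fields[idx]
--                             for idx in range(4)))
--     return result
-- ===== Notes on version B (the rewrite author's own statement) =====
-- stated objective: alternative
-- what changed: Replaces the four nested loops with mutable append/del bookkeeping by a single loop over a 4-bit mask 0..15, decoding each bit (high bit = lang, low bit = food) to choose the field or "-".
import Mathlib
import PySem

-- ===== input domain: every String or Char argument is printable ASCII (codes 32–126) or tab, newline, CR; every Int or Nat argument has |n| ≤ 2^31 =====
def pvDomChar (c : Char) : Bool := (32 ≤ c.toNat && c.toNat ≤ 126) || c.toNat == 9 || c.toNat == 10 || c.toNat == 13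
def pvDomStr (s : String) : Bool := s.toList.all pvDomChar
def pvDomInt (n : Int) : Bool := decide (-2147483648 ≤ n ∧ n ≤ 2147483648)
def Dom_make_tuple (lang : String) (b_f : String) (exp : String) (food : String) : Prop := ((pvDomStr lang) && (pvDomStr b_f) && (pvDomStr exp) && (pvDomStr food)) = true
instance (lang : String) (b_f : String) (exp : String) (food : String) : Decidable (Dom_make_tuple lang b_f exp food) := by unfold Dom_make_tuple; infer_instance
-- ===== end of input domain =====

-- B replaces the nested append/del loops by a single 4-bit mask loop (alternative decomposition; same cost).


-- ===== PORT A =====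
-- helper for A's `tuple(trans)` on the 4-element trans list
def pvTup (trans : List String) : String × String × String × String :=
  match trans with
  | [a, b, c, d] => (a, b, c, d)
  | _ => ("", "", "", "")

-- transliteration of A: nested loops threading (result, trans); append = ++ [x], del trans[i] = eraseIdx i
def make_tuple (lang : String) (b_f : String) (exp : String) (food : String) : List (String × String × String × String) :=
  let result : List (String × String × String × String) := []
  (([lang, "-"]).foldl (fun st i =>
    let trans : List String := []
    let trans := trans ++ [i]
    let st1 := ([b_f, "-"]).foldl (fun st j =>
      let trans := st.2 ++ [j]
      let st2 := ([exp, "-"]).foldl (fun st k =>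
        let trans := st.2 ++ [k]
        let st3 := ([food, "-"]).foldl (fun st l =>
          let trans := st.2 ++ [l]
          let result := st.1 ++ [pvTup trans]
          (result, trans.eraseIdx 3)) (st.1, trans)
        (st3.1, st3.2.eraseIdx 2)) (st.1, trans)
      (st2.1, st2.2.eraseIdx 1)) (st.1, trans)
    (st1.1, st1.2.eraseIdx 0)) (result, ([] : List String))).1

-- ===== PORT B =====
-- transliteration of B: one loop over mask in range(16); bit (3-idx) chooses "-" or fields[idx]
def pvPick (fields : List String) (mask : Int) (idx : Nat) : String :=
  if PySem.Int.mod (PySem.Int.floordiv mask ((2 : Int) ^ (3 - idx))) 2 ≠ 0 then "-"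
  else (PySem.List.pyGet? fields (Int.ofNat idx)).getD ""

def make_tuple_alt (lang : String) (b_f : String) (exp : String) (food : String) : List (String × String × String × String) :=
  let fields := [lang, b_f, exp, food]
  (PySem.List.pyRange 0 16 1).foldl (fun result mask =>
    result ++ [(pvPick fields mask 0, pvPick fields mask 1, pvPick fields mask 2, pvPick fields mask 3)]) []

-- ===== PRECONDITION & SPEC =====
def Spec_make_tuple (lang : String) (b_f : String) (exp : String) (food : String) (out : List (String × String × String × String)) : Prop := out = make_tuple_alt lang b_f exp food
instance (lang : String) (b_f : String) (exp : String) (food : String) (out : List (String × String × String × String)) : Decidable (Spec_make_tuple lang b_f exp food out) := by unfold Spec_make_tuple; infer_instance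

-- ===== CLAIM (what is proved, stated in full; the proofs are below) =====
def Claim_equal_make_tuple : Prop := ∀ (lang : String) (b_f : String) (exp : String) (food : String), Dom_make_tuple lang b_f exp food → Spec_make_tuple lang b_f exp food (make_tuple lang b_f exp food)

-- ===== LEMMAS AND PROOFS =====

-- ===== VERDICT (by name: the statement is the Claim_ definition above) =====
set_option maxHeartbeats 2000000 in
theorem make_tuple_spec : Claim_equal_make_tuple := by
  intro lang b_f exp food _
  unfold Spec_make_tuple
  simp [make_tuple, make_tuple_alt, pvPick, pvTup, PySem.List.pyRange_one_cons,
    PySem.Int.floordiv, PySem.Int.mod, PySem.List.pyGet?, PySem.List.pyIdx?]
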